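-- pv_equiv track=rewrite | github.com/Erew42/NLP_Thesis | tests/test_10q_part_inference_v2.py | _parts_by_item_id
-- ===== SOURCE A (Python) =====
-- def _parts_by_item_id(items: list[dict[str, object]]) -> dict[str, list[str | None]]:
--     parts: dict[str, list[str | None]] = {}
--     for item in items:
--         item_id = str(item.get("item_id") or "")
--         if not item_id:
--             continue
--         parts.setdefault(item_id, []).append(item.get("item_part"))
--     return parts
-- ===== SOURCE B (Python) =====
-- def _parts_by_item_id(items: list[dict[str, object]]) -> dict[str, list[str | None]]:
--     keys: list[str] = []
--     for item in items:
--         k = str(item.get("item_id") or "")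
--         if k and k not in keys:
--             keys.append(k)
--     return {
--         k: [it.get("item_part") for it in items if str(it.get("item_id") or "") == k]
--         for k in keys
--     }
-- ===== Notes on version B (the rewrite author's own statement) =====
-- stated objective: alternative
-- what changed: Replaces the incremental setdefault-append accumulation with a two-pass strategy: first collect the distinct non-empty ids in first-occurrence order, then build the result dict by gathering each group with one filtering pass per key.
import Mathlib
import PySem

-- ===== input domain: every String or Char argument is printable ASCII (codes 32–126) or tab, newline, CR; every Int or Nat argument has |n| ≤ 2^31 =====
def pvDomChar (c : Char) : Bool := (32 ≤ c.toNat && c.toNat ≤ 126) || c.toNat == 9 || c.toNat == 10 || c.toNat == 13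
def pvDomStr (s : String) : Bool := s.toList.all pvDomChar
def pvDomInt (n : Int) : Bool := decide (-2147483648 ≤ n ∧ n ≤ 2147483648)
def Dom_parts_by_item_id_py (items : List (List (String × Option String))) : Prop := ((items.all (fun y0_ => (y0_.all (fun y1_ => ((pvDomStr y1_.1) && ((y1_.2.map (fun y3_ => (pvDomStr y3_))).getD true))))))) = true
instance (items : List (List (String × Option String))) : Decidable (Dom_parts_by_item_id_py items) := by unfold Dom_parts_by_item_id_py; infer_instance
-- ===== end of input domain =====

-- B replaces A's incremental setdefault-append accumulation by a two-pass strategy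
-- (collect distinct ids in first-occurrence order, then gather each group by filtering);
-- objective: alternative (same results, genuinely different traversal).

-- ===== PORT A =====
-- str(item.get("item_id") or ""): missing key or None or "" all give "", otherwise the string itself
def pvKey (item : List (String × Option String)) : String :=
  (((PySem.Dict.mk item).get? "item_id").join).getD ""

-- item.get("item_part"): None when missing, else the stored value (str or None)
def pvPart (item : List (String × Option String)) : Option String :=
  ((PySem.Dict.mk item).get? "item_part").join

def parts_by_item_id_py (items : List (List (String × Option String))) : List (String × List (Option String)) :=
  (items.foldl
    (fun parts item =>
      let item_id := pvKey item
      if item_id = "" then parts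
      else
        -- parts.setdefault(item_id, []).append(item.get("item_part"))
        parts.modify item_id [] (fun l => l ++ [pvPart item]))
    PySem.Dict.empty).items

-- ===== PORT B =====
def parts_by_item_id_py_alt (items : List (List (String × Option String))) : List (String × List (Option String)) :=
  let keys := items.foldl
    (fun ks item =>
      let k := pvKey item
      if k ≠ "" ∧ k ∉ ks then ks ++ [k] else ks) []
  (keys.foldl
    (fun d k =>
      d.insert k ((items.filter (fun it => pvKey it == k)).map pvPart))
    PySem.Dict.empty).items

-- ===== PRECONDITION & SPEC =====
def Spec_parts_by_item_id_py (items : List (List (String × Option String))) (out : List (String × List (Option String))) : Prop := out = parts_by_item_id_py_alt items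
instance (items : List (List (String × Option String))) (out : List (String × List (Option String))) : Decidable (Spec_parts_by_item_id_py items out) := by unfold Spec_parts_by_item_id_py; infer_instance

-- ===== CLAIM (what is proved, stated in full; the proofs are below) =====
def Claim_equal_parts_by_item_id_py : Prop := ∀ (items : List (List (String × Option String))), Dom_parts_by_item_id_py items → Spec_parts_by_item_id_py items (parts_by_item_id_py items)

-- ===== LEMMAS AND PROOFS =====

-- A's loop equals a modify-fold over the (key, part) pairs of the items with non-empty key
theorem pvA_fold_eq_pairs (items : List (List (String × Option String)))
    (d : PySem.Dict String (List (Option String))) :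
    items.foldl
      (fun parts item =>
        let item_id := pvKey item
        if item_id = "" then parts
        else parts.modify item_id [] (fun l => l ++ [pvPart item])) d
    = ((items.filter (fun it => !(pvKey it == ""))).map (fun it => (pvKey it, pvPart it))).foldl
        (fun d p => d.modify p.1 [] (fun l => l ++ [p.2])) d := by
  induction items generalizing d with
  | nil => rfl
  | cons it rest ih =>
    by_cases h : pvKey it = "" <;> simp [h, ih]

-- B's key-collection loop is PySem.Set.update of the non-empty keys
theorem pvB_keys_eq_update (items : List (List (String × Option String))) (acc : List String) :
    items.foldl
      (fun ks item =>
        let k := pvKey item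
        if k ≠ "" ∧ k ∉ ks then ks ++ [k] else ks) acc
    = PySem.Set.update acc ((items.filter (fun it => !(pvKey it == ""))).map pvKey) := by
  induction items generalizing acc with
  | nil => simp [PySem.Set.update]
  | cons it rest ih =>
    by_cases h : pvKey it = ""
    · simp [h, ih]
    · by_cases hm : pvKey it ∈ acc <;>
        simp [h, hm, ih, PySem.Set.update_cons, PySem.Set.add]

theorem pv_filter_key (items : List (List (String × Option String))) (k : String) (hk : k ≠ "") :
    (items.filter (fun it => (pvKey it == k) && !(pvKey it == "")))
      = items.filter (fun it => pvKey it == k) := by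
  apply List.filter_congr
  intro it _
  by_cases h : pvKey it = k
  · simp [h, hk]
  · simp [h]

-- ===== VERDICT (by name: the statement is the Claim_ definition above) =====
theorem parts_by_item_id_py_spec : Claim_equal_parts_by_item_id_py := by
  intro items _
  unfold Spec_parts_by_item_id_py parts_by_item_id_py parts_by_item_id_py_alt
  rw [pvA_fold_eq_pairs, pvB_keys_eq_update]
  set L := (items.filter (fun it => !(pvKey it == ""))).map (fun it => (pvKey it, pvPart it)) with hL
  set dA := L.foldl (fun d p => d.modify p.1 [] (fun l => l ++ [p.2])) PySem.Dict.empty with hdA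
  have hkeysL : L.map Prod.fst = (items.filter (fun it => !(pvKey it == ""))).map pvKey := by
    simp [hL]
  have hkeysA : dA.keys = PySem.Set.ofList (L.map Prod.fst) := by
    rw [hdA, PySem.Dict.keys_foldl_modify_key]
    simp [PySem.Set.update_nil_left]
  have hnd : dA.keys.Nodup := by
    rw [hkeysA]; exact PySem.Set.nodup_ofList _
  have hupd : PySem.Set.update ([] : List String)
      ((items.filter (fun it => !(pvKey it == ""))).map pvKey) = dA.keys := by
    rw [PySem.Set.update_nil_left, hkeysA, hkeysL]
  rw [hupd]
  show dA.items = (dA.keys.foldl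
      (fun d k => d.insert k ((items.filter (fun it => pvKey it == k)).map pvPart))
      PySem.Dict.empty).items
  have hins := PySem.Dict.items_foldl_insert_fresh (l := dA.keys) (k := fun x => x)
      (v := fun k => (items.filter (fun it => pvKey it == k)).map pvPart)
      (d := (PySem.Dict.empty : PySem.Dict String (List (Option String))))
      (fun _ _ => PySem.Dict.contains_empty _) (by simpa using hnd)
  simp only at hins
  rw [hins]
  have hemp : (PySem.Dict.empty : PySem.Dict String (List (Option String))).items = [] := rfl
  rw [hemp, List.nil_append]
  rw [PySem.Dict.items_eq_map_keys dA hnd []]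
  apply List.map_congr_left
  intro k hkmem
  have hk : k ≠ "" := by
    rw [hkeysA, hkeysL] at hkmem
    have := (PySem.Set.mem_ofList _ _).mp hkmem
    simp only [List.mem_map, List.mem_filter] at this
    obtain ⟨it, ⟨_, hne⟩, hkey⟩ := this
    simpa [hkey] using hne
  have hgd : dA.getD k [] = (L.filter (fun p => p.1 == k)).map Prod.snd := by
    rw [hdA, PySem.Dict.getD_foldl_modify_append]
    simp
  simp only [hgd, hL]
  congr 1
  rw [List.filter_map, List.map_map, List.filter_filter]
  simp only [Function.comp_def]
  rw [pv_filter_key items k hk]
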